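-- pv_equiv track=rewrite | github.com/GAM-team/GAM | src/gam/gapi/directory/orgunits.py | encodeOrgUnitPath
-- ===== SOURCE A (Python) =====
-- def encodeOrgUnitPath(path):
--     if path.find('+') == -1 and path.find('%') == -1:
--         return path
--     encpath = ''
--     for c in path:
--         if c == '+':
--             encpath += '%2B'
--         elif c == '%':
--             encpath += '%25'
--         else:
--             encpath += c
--     return encpath
-- ===== SOURCE B (Python) =====
-- def encodeOrgUnitPath(path):
--     # '%' first so the '%' introduced by '%2B' is never re-encoded
--     return path.replace('%', '%25').replace('+', '%2B')
-- ===== Notes on version B (the rewrite author's own statement) =====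
-- stated objective: simpler
-- what changed: Replaced the find-guard plus per-character accumulation loop by two whole-string str.replace passes ('%' first, then '+'), with no loop or branches.
import Mathlib
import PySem

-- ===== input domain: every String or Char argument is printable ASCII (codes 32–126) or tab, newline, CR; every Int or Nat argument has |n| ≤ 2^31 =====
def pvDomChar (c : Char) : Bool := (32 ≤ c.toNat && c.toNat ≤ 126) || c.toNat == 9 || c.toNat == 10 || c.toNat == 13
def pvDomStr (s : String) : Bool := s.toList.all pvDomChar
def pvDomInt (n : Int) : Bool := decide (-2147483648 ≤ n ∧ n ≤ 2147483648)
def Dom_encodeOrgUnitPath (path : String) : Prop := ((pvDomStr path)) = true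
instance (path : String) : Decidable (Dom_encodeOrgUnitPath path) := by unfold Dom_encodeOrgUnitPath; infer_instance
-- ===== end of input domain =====

-- B replaces A's find-guard + per-character accumulation loop by two whole-string
-- replace passes ('%' first, then '+'): simpler, no explicit loop or branches.

-- ===== PORT A =====
def encodeOrgUnitPath (path : String) : String :=
  if PySem.Str.find path "+" = -1 ∧ PySem.Str.find path "%" = -1 then path
  else
    path.toList.foldl
      (fun encpath c =>
        if c = '+' then encpath ++ "%2B"
        else if c = '%' then encpath ++ "%25"
        else encpath.push c) ""

-- ===== PORT B =====
def encodeOrgUnitPath_alt (path : String) : String :=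
  PySem.Str.replace (PySem.Str.replace path "%" "%25") "+" "%2B"

-- ===== PRECONDITION & SPEC =====
def Spec_encodeOrgUnitPath (path : String) (out : String) : Prop := out = encodeOrgUnitPath_alt path
instance (path : String) (out : String) : Decidable (Spec_encodeOrgUnitPath path out) := by unfold Spec_encodeOrgUnitPath; infer_instance

-- ===== CLAIM (what is proved, stated in full; the proofs are below) =====
def Claim_equal_encodeOrgUnitPath : Prop := ∀ (path : String), Dom_encodeOrgUnitPath path → Spec_encodeOrgUnitPath path (encodeOrgUnitPath path)

-- ===== LEMMAS AND PROOFS =====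

-- the per-character encoding both programs perform, as a flatMap function
def pvEnc (c : Char) : List Char :=
  if c = '+' then ['%', '2', 'B'] else if c = '%' then ['%', '2', '5'] else [c]

-- single-character replace is a flatMap (with enough fuel)
theorem replace_go_single (o : Char) (new : List Char) :
    ∀ (l acc : List Char) (fuel : Nat), l.length ≤ fuel →
      PySem.Chars.replace.go [o] new fuel l acc =
        acc.reverse ++ l.flatMap (fun c => if c = o then new else [c]) := by
  intro l
  induction l with
  | nil =>
      intro acc fuel _
      cases fuel <;> simp [PySem.Chars.replace.go]
  | cons c t ih =>
      intro acc fuel hf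
      cases fuel with
      | zero => simp at hf
      | succ n =>
          simp only [List.length_cons, Nat.succ_le_succ_iff] at hf
          rw [PySem.Chars.replace.go]
          by_cases hco : c = o
          · subst hco
            have : List.isPrefixOf [c] (c :: t) = true := by
              simp [List.isPrefixOf]
            simp only [this, if_pos, List.length_cons, List.length_nil, Nat.zero_add,
              List.drop_succ_cons, List.drop_zero]
            rw [ih _ n hf]
            simp
          · have hpre : List.isPrefixOf [o] (c :: t) = false := by
              simp only [List.isPrefixOf, Bool.and_true]
              exact beq_eq_false_iff_ne.mpr (Ne.symm hco)
            simp only [hpre, Bool.false_eq_true, if_false]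
            rw [ih _ n (Nat.le_of_succ_le_succ (Nat.succ_le_succ hf))]
            simp [hco]

theorem replace_single (o : Char) (new l : List Char) :
    PySem.Chars.replace l [o] new = l.flatMap (fun c => if c = o then new else [c]) := by
  rw [PySem.Chars.replace]
  simp only [List.isEmpty_cons, Bool.false_eq_true, if_false]
  rw [replace_go_single o new l [] l.length (le_refl _)]
  simp

-- composing the two passes gives pvEnc
theorem two_pass_flatMap (l : List Char) :
    (l.flatMap (fun c => if c = '%' then ['%', '2', '5'] else [c])).flatMap
        (fun c => if c = '+' then ['%', '2', 'B'] else [c]) = l.flatMap pvEnc := by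
  induction l with
  | nil => rfl
  | cons c t ih =>
      by_cases h1 : c = '+'
      · subst h1; simp [pvEnc, ih]
      · by_cases h2 : c = '%'
        · subst h2; simp [pvEnc, ih]
        · simp [pvEnc, h1, h2, ih]

theorem alt_eq_flatMap (path : String) :
    encodeOrgUnitPath_alt path = String.ofList (path.toList.flatMap pvEnc) := by
  unfold encodeOrgUnitPath_alt
  rw [PySem.Str.replace, PySem.Str.replace]
  rw [show ("%" : String).toList = ['%'] from rfl, show ("+" : String).toList = ['+'] from rfl,
      show ("%25" : String).toList = ['%','2','5'] from rfl,
      show ("%2B" : String).toList = ['%','2','B'] from rfl]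
  rw [replace_single, String.toList_ofList, replace_single, two_pass_flatMap]

-- A's accumulation loop computes the same flatMap
theorem a_loop (l : List Char) :
    ∀ (enc : String),
      l.foldl (fun encpath c =>
        if c = '+' then encpath ++ "%2B"
        else if c = '%' then encpath ++ "%25"
        else encpath.push c) enc = enc ++ String.ofList (l.flatMap pvEnc) := by
  induction l with
  | nil =>
      intro enc
      rw [← String.toList_inj]
      simp
  | cons c t ih =>
      intro enc
      simp only [List.foldl_cons]
      by_cases h1 : c = '+'
      · subst h1
        rw [if_pos rfl, ih]
        rw [← String.toList_inj]
        simp [pvEnc]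
      · by_cases h2 : c = '%'
        · subst h2
          rw [if_neg (by decide), if_pos rfl, ih]
          rw [← String.toList_inj]
          simp [pvEnc]
        · rw [if_neg h1, if_neg h2, ih]
          rw [← String.toList_inj]
          simp [pvEnc, h1, h2]

theorem flatMap_id_of_not_mem {l : List Char}
    (hp : '+' ∉ l) (hm : '%' ∉ l) : l.flatMap pvEnc = l := by
  induction l with
  | nil => rfl
  | cons c t ih =>
      simp only [List.mem_cons, not_or] at hp hm
      rw [List.flatMap_cons, ih hp.2 hm.2]
      simp [pvEnc, Ne.symm hp.1, Ne.symm hm.1]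

-- ===== VERDICT (by name: the statement is the Claim_ definition above) =====
theorem singleton_infix_iff_mem {a : Char} {l : List Char} : [a] <:+: l ↔ a ∈ l := by
  constructor
  · intro h; exact h.mem (by simp)
  · intro h
    obtain ⟨s, t, rfl⟩ := List.append_of_mem h
    exact ⟨s, t, by simp⟩

theorem encodeOrgUnitPath_spec : Claim_equal_encodeOrgUnitPath := by
  intro path _
  unfold Spec_encodeOrgUnitPath
  unfold encodeOrgUnitPath
  rw [alt_eq_flatMap]
  by_cases h : PySem.Str.find path "+" = -1 ∧ PySem.Str.find path "%" = -1
  · rw [if_pos h]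
    have hp : '+' ∉ path.toList := fun hm =>
      (PySem.Str.find_eq_neg_one_iff path "+").mp h.1
        (by rw [show ("+" : String).toList = ['+'] from rfl]
            exact singleton_infix_iff_mem.mpr hm)
    have hm : '%' ∉ path.toList := fun hmem =>
      (PySem.Str.find_eq_neg_one_iff path "%").mp h.2
        (by rw [show ("%" : String).toList = ['%'] from rfl]
            exact singleton_infix_iff_mem.mpr hmem)
    rw [flatMap_id_of_not_mem hp hm]
    rw [← String.toList_inj]
    simp
  · rw [if_neg h, a_loop]
    rw [← String.toList_inj]
    simp
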